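-- pv_equiv track=rewrite | github.com/rihat99/BetterRobot | src/better_robot/data_model/topology.py | build_supports
-- ===== SOURCE A (Python) =====
-- def topo_sort(parents: tuple[int, ...]) -> tuple[int, ...]:
--     """Return a topological order where every parent precedes its children.
--
--     Joint 0 (universe, ``parents[0] == -1``) comes first.
--     Uses depth-first traversal for deterministic ordering.
--     """
--     children = build_children(parents)
--     order: list[int] = []
--     stack: list[int] = [0]
--     while stack:
--         j = stack.pop()
--         order.append(j)
--         # Push children reversed so they pop in ascending (sorted) order
--         for child in reversed(children[j]):
--             stack.append(child)
--     return tuple(order)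
--
-- def build_children(parents: tuple[int, ...]) -> tuple[tuple[int, ...], ...]:
--     """Return ``children[i]`` = sorted tuple of joint ids whose parent is ``i``."""
--     n = len(parents)
--     ch: list[list[int]] = [[] for _ in range(n)]
--     for j, p in enumerate(parents):
--         if p >= 0:
--             ch[p].append(j)
--     return tuple(tuple(sorted(c)) for c in ch)
--
-- def build_supports(parents: tuple[int, ...]) -> tuple[tuple[int, ...], ...]:
--     """Return ``supports[i]`` = chain from joint 0 to joint ``i`` (inclusive)."""
--     n = len(parents)
--     result: list[tuple[int, ...]] = [() for _ in range(n)]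
--     for j in topo_sort(parents):
--         p = parents[j]
--         if p < 0:
--             result[j] = (j,)
--         else:
--             result[j] = result[p] + (j,)
--     return tuple(result)
-- ===== SOURCE B (Python) =====
-- def build_supports(parents: tuple[int, ...]) -> tuple[tuple[int, ...], ...]:
--     """Return ``supports[i]`` = chain from joint 0 to joint ``i`` (inclusive).
--
--     Walks UP the parent links from each joint instead of topologically
--     sorting the whole tree; joints whose upward walk does not end at
--     joint 0 get an empty chain.  A valid chain has at most ``n`` links,
--     so longer walks (cyclic parent arrays) stop and yield ().
--     """
--     n = len(parents)
--
--     def chain_to(j: int) -> tuple[int, ...]: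
--         chain = []
--         cur = j
--         while cur != 0 and len(chain) <= n:
--             chain.append(cur)
--             p = parents[cur]
--             if p < 0:
--                 break
--             cur = p
--         if cur != 0:
--             return ()
--         chain.append(0)
--         return tuple(reversed(chain))
--
--     return tuple(chain_to(j) for j in range(n))
-- ===== Notes on version B (the rewrite author's own statement) =====
-- stated objective: simpler
-- what changed: Replaces the children-table build, DFS topological sort and forward chain-accumulation pass with a single direct upward walk along parents[] from each joint, reversed into the root-to-joint chain (empty when the walk does not end at joint 0).
-- outside the precondition, e.g. on build_supports(()): A raises IndexError, B returns ()
import Mathlib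
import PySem

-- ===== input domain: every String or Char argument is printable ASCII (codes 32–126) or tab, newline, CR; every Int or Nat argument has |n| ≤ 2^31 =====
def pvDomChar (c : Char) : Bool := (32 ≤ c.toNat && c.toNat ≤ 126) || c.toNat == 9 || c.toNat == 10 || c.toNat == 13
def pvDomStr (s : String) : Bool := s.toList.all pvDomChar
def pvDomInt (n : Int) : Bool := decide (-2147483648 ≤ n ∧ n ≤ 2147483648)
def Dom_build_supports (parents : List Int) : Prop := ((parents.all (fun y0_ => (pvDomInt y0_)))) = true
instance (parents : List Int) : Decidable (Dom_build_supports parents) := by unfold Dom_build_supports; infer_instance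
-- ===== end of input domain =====

-- B replaces the children-table + DFS topological sort + forward accumulation pass of A by a
-- direct upward walk along parents[] from each joint (reversed into the root-to-joint chain).


-- ===== PORT A =====
-- ch[i] = sorted list of joints whose parent is i (ch[p].append(j) ported with List.modify;
-- under Pre_ every nonnegative p is in range, matching Python's ch[p])
def build_children (parents : List Int) : List (List Int) :=
  let n := parents.length
  let ch : List (List Int) := (List.range n).map (fun _ => [])
  let ch := (PySem.List.enumerate parents).foldl
    (fun ch jp => if 0 ≤ jp.2 then ch.modify jp.2.toNat (fun c => c ++ [jp.1]) else ch) ch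
  ch.map (fun c => PySem.List.sorted c (fun x => x) false)

-- the while loop of topo_sort; fuel n+1 covers every run the Python finishes (each joint is
-- popped at most once under Pre_, see the lemmas below)
def topoLoop (children : List (List Int)) : Nat → List Int → List Int → List Int
  | 0, order, _stack => order
  | fuel+1, order, stack =>
    match stack.getLast? with
    | none => order
    | some j => topoLoop children fuel (order ++ [j]) (stack.dropLast ++ (children.getD j.toNat []).reverse)

def topo_sort (parents : List Int) : List Int :=
  topoLoop (build_children parents) (parents.length + 1) [] [0]

def build_supports (parents : List Int) : List (List Int) :=
  let n := parents.length
  let result : List (List Int) := (List.range n).map (fun _ => [])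
  (topo_sort parents).foldl (fun result j =>
    let p := parents.getD j.toNat (-1)
    if p < 0 then result.set j.toNat [j]
    else result.set j.toNat ((result.getD p.toNat []) ++ [j])) result

-- ===== PORT B =====
-- the while loop of chain_to: walk up the parent links, collecting visited joints
def chainLoop (parents : List Int) (n : Nat) (cur : Int) (chain : List Int) : Int × List Int :=
  if h : cur ≠ 0 ∧ chain.length ≤ n then
    let chain' := chain ++ [cur]
    let p := parents.getD cur.toNat (-1)
    if p < 0 then (cur, chain') else chainLoop parents n p chain'
  else (cur, chain)
termination_by n + 1 - chain.length
decreasing_by simp; omega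

def chain_to (parents : List Int) (n : Nat) (j : Int) : List Int :=
  let r := chainLoop parents n j []
  if r.1 ≠ 0 then [] else (r.2 ++ [0]).reverse

def build_supports_alt (parents : List Int) : List (List Int) :=
  (List.range parents.length).map (fun j => chain_to parents parents.length (Int.ofNat j))

-- ===== PRECONDITION & SPEC =====
-- the upward parent walk starting at `start` (stays put once negative)
def walkW (parents : List Int) (start : Int) : Nat → Int
  | 0 => start
  | k+1 => let c := walkW parents start k
           if c < 0 then c else parents.getD c.toNat (-1)

-- exactly the inputs on which the Python A returns: a nonempty parents tuple, every entry < n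
-- (an entry ≥ n is an IndexError in build_children; the empty tuple an IndexError in topo_sort),
-- and joint 0 not on a parent cycle (otherwise topo_sort loops forever)
def Pre_build_supports (parents : List Int) : Prop :=
  parents ≠ [] ∧ (∀ p ∈ parents, p < (parents.length : Int)) ∧
  ∀ k, k < parents.length + 1 → 1 ≤ k → walkW parents 0 k ≠ 0

instance (parents : List Int) : Decidable (Pre_build_supports parents) := by
  unfold Pre_build_supports; infer_instance

def pvWitness_build_supports : List Int := [-1, 0, 1, 1]

def Spec_build_supports (parents : List Int) (out : List (List Int)) : Prop := out = build_supports_alt parents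
instance (parents : List Int) (out : List (List Int)) : Decidable (Spec_build_supports parents out) := by unfold Spec_build_supports; infer_instance

-- ===== CLAIM (what is proved, stated in full; the proofs are below) =====
def Claim_equal_build_supports : Prop := ∀ (parents : List Int), Dom_build_supports parents → Pre_build_supports parents → Spec_build_supports parents (build_supports parents)

-- ===== LEMMAS AND PROOFS =====

-- `Chain parents j c` : the upward walk from joint j reaches joint 0, and c is the root-first
-- chain [0, …, j] (A stores it in result[j], B returns it from chain_to).
inductive Chain (parents : List Int) : Int → List Int → Prop
  | base : Chain parents 0 [0]
  | step (j : Int) (c : List Int) : j ≠ 0 → 0 ≤ j →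
      0 ≤ parents.getD j.toNat (-1) → Chain parents (parents.getD j.toNat (-1)) c →
      Chain parents j (c ++ [j])

theorem chain_nonempty {parents : List Int} {j : Int} {c : List Int}
    (h : Chain parents j c) : c ≠ [] := by
  cases h <;> simp

theorem chain_getLast? {parents : List Int} {j : Int} {c : List Int}
    (h : Chain parents j c) : c.getLast? = some j := by
  cases h <;> simp

theorem chain_head? {parents : List Int} {j : Int} {c : List Int}
    (h : Chain parents j c) : c.head? = some 0 := by
  induction h with
  | base => rfl
  | step j c hj h0 hp hc ih =>
    rcases List.exists_cons_of_ne_nil (chain_nonempty hc) with ⟨a, t, rfl⟩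
    simpa using ih

theorem chain_nonneg {parents : List Int} {j : Int} {c : List Int}
    (h : Chain parents j c) : 0 ≤ j := by
  cases h with
  | base => norm_num
  | step j c hj h0 hp hc => exact h0

theorem chain_inv {parents : List Int} {j : Int} {c : List Int}
    (h : Chain parents j c) (hj : j ≠ 0) :
    ∃ c', c = c' ++ [j] ∧ 0 ≤ parents.getD j.toNat (-1) ∧
      Chain parents (parents.getD j.toNat (-1)) c' := by
  cases h with
  | base => exact absurd rfl hj
  | step j c _ _ hp hc => exact ⟨c, rfl, hp, hc⟩

theorem chain_elems {parents : List Int} {j : Int} {c : List Int}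
    (h : Chain parents j c) : ∀ x ∈ c, 0 ≤ x := by
  induction h with
  | base => simp
  | step j c hj h0 hp hc ih =>
    intro x hx
    rcases List.mem_append.mp hx with hx | hx
    · exact ih x hx
    · simp at hx; omega

theorem getD_nonneg_lt {parents : List Int} {m : Nat}
    (h : 0 ≤ parents.getD m (-1)) : m < parents.length := by
  by_contra hm
  rw [List.getD_eq_default] at h; omega
  omega

theorem chain_elem_lt {parents : List Int} {j : Int} {c : List Int}
    (hne : parents ≠ []) (h : Chain parents j c) : ∀ x ∈ c, x.toNat < parents.length := by
  induction h with
  | base =>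
    intro x hx; simp at hx; subst hx
    cases parents with
    | nil => exact absurd rfl hne
    | cons a t => simp
  | step j c hj h0 hp hc ih =>
    intro x hx
    rcases List.mem_append.mp hx with hx | hx
    · exact ih x hx
    · simp at hx; subst hx; exact getD_nonneg_lt hp

-- the parent link between consecutive chain elements
theorem chain_link {parents : List Int} {j : Int} {c : List Int}
    (h : Chain parents j c) : ∀ (k : Nat), k + 1 < c.length →
      parents.getD (c.getD (k + 1) 0).toNat (-1) = c.getD k 0 := by
  induction h with
  | base => intro k hk; simp at hk
  | step j c hj h0 hp hc ih =>
    intro k hk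
    have hc1 : 0 < c.length := List.length_pos_iff.mpr (chain_nonempty hc)
    simp at hk
    by_cases hkc : k + 1 < c.length
    · rw [List.getD_append _ _ _ _ hkc, List.getD_append _ _ _ _ (by omega)]
      exact ih k hkc
    · have hk1 : k + 1 = c.length := by omega
      have h1 : (c ++ [j]).getD (k + 1) 0 = j := by
        rw [List.getD_eq_getElem _ _ (by simp; omega)]
        simp [hk1]
      have h2 : c.getD k 0 = parents.getD j.toNat (-1) := by
        rw [List.getD_eq_getElem?_getD]
        have := chain_getLast? hc
        rw [List.getLast?_eq_getElem?] at this
        have hk2 : k = c.length - 1 := by omega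
        rw [hk2, this]; rfl
      rw [h1, List.getD_append _ _ _ _ (by omega), h2]

theorem chain_nodup {parents : List Int} {j : Int} {c : List Int}
    (h : Chain parents j c) : c.Nodup := by
  induction h with
  | base => simp
  | step j c hj h0 hp hc ih =>
    rw [List.nodup_append]
    refine ⟨ih, by simp, ?_⟩
    intro x hx b hb
    simp only [List.mem_singleton] at hb
    subst hb
    intro hxj
    subst hxj
    rcases List.getElem_of_mem hx with ⟨i, hi, hie⟩
    rcases Nat.eq_zero_or_pos i with h0i | h0i
    · subst h0i
      have := chain_head? hc
      rcases List.exists_cons_of_ne_nil (chain_nonempty hc) with ⟨a, t, rfl⟩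
      simp at this hie
      exact hj (by omega)
    · have hlink := chain_link hc (i - 1) (by omega)
      have hi1 : i - 1 + 1 = i := by omega
      rw [hi1] at hlink
      rw [List.getD_eq_getElem _ _ hi, hie] at hlink
      have hlast := chain_getLast? hc
      rw [List.getLast?_eq_getElem?] at hlast
      have hll : c.getD (c.length - 1) 0 = parents.getD x.toNat (-1) := by
        rw [List.getD_eq_getElem?_getD, hlast]; rfl
      rw [hlink] at hll
      rw [List.getD_eq_getElem _ _ (by omega), List.getD_eq_getElem _ _ (by omega)] at hll
      have := (List.Nodup.getElem_inj_iff ih).mp hll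
      omega

theorem nodup_bounded_length_le {L : List Int} {n : Nat}
    (hnd : L.Nodup) (hb : ∀ x ∈ L, 0 ≤ x ∧ x.toNat < n) : L.length ≤ n := by
  have hmnd : (L.map Int.toNat).Nodup := by
    refine List.Nodup.map_on ?_ hnd
    intro x hx y hy hxy
    have h1 := hb x hx; have h2 := hb y hy; omega
  have hsub : (L.map Int.toNat).toFinset ⊆ Finset.range n := by
    intro m hm
    simp at hm
    rcases hm with ⟨x, hx, rfl⟩
    exact Finset.mem_range.mpr (hb x hx).2
  have := Finset.card_le_card hsub
  rw [List.toFinset_card_of_nodup hmnd, Finset.card_range] at this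
  simpa using this

theorem chain_length_le {parents : List Int} {j : Int} {c : List Int}
    (hne : parents ≠ []) (h : Chain parents j c) : c.length ≤ parents.length := by
  apply nodup_bounded_length_le (chain_nodup h)
  exact fun x hx => ⟨chain_elems h x hx, chain_elem_lt hne h x hx⟩

-- ---- walkW facts: Pre_ rules out a parent cycle through joint 0 ----

theorem walkW_add (parents : List Int) (start : Int) (a b : Nat) :
    walkW parents start (a + b) = walkW parents (walkW parents start a) b := by
  induction b with
  | zero => rfl
  | succ b ih => simp [walkW, ih]

theorem chain_walkW {parents : List Int} {j : Int} {c : List Int}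
    (h : Chain parents j c) : walkW parents j (c.length - 1) = 0 := by
  induction h with
  | base => rfl
  | step j c hj h0 hp hc ih =>
    have hc1 : 0 < c.length := List.length_pos_iff.mpr (chain_nonempty hc)
    have : (c ++ [j]).length - 1 = 1 + (c.length - 1) := by simp; omega
    rw [this, walkW_add]
    have h1 : walkW parents j 1 = parents.getD j.toNat (-1) := by
      simp [walkW]; omega
    rw [h1]; exact ih

theorem pre_no_zero_parent {parents : List Int} {q : Int} {c : List Int}
    (hpre : Pre_build_supports parents) (hc : Chain parents q c)
    (hq : parents.getD 0 (-1) = q) : False := by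
  obtain ⟨hne, _, h3⟩ := hpre
  have h1 : walkW parents 0 1 = q := by simp [walkW]; exact hq
  have h2 : walkW parents 0 (1 + (c.length - 1)) = 0 := by
    rw [walkW_add, h1]; exact chain_walkW hc
  have hcl : 1 ≤ c.length := List.length_pos_iff.mpr (chain_nonempty hc)
  have hlen : c.length ≤ parents.length := chain_length_le hne hc
  exact h3 (1 + (c.length - 1)) (by omega) (by omega) h2

theorem pre_no_self_parent {parents : List Int} {j : Int} {c : List Int}
    (hpre : Pre_build_supports parents) (hc : Chain parents j c)
    (hj : parents.getD j.toNat (-1) = j) : False := by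
  have h0j : 0 ≤ j := chain_nonneg hc
  by_cases hz : j = 0
  · subst hz; exact pre_no_zero_parent hpre hc (by simpa using hj)
  · have hwalk : ∀ k, walkW parents j k = j := by
      intro k; induction k with
      | zero => rfl
      | succ k ih => simp only [walkW]; rw [ih, if_neg (by omega), hj]
    have := chain_walkW hc
    rw [hwalk] at this
    exact hz this

-- a chain passing through j ≠ endpoint has a child of j on it
theorem chain_succ {parents : List Int} {i j : Int} {c : List Int}
    (hc : Chain parents i c) (hj : j ∈ c) (hne : j ≠ i) :
    ∃ x ∈ c, x ≠ j ∧ 0 ≤ x ∧ parents.getD x.toNat (-1) = j := by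
  induction hc with
  | base => simp at hj; omega
  | step i c hi h0 hp hc ih =>
    rcases List.mem_append.mp hj with hj' | hj'
    · by_cases hjp : j = parents.getD i.toNat (-1)
      · exact ⟨i, by simp, fun h => hne (h ▸ rfl), h0, hjp ▸ rfl⟩
      · rcases ih hj' hjp with ⟨x, hx, hxs⟩
        exact ⟨x, List.mem_append_left _ hx, hxs⟩
    · simp at hj'; exact absurd hj' hne

-- ---- children characterization ----

theorem foldA_length (E : List (Int × Int)) :
    ∀ ch0 : List (List Int),
      (E.foldl (fun ch jp => if 0 ≤ jp.2 then ch.modify jp.2.toNat (fun c => c ++ [jp.1]) else ch) ch0).length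
        = ch0.length := by
  induction E with
  | nil => intro ch0; rfl
  | cons jp E ih =>
    intro ch0
    simp only [List.foldl_cons]
    rw [ih]
    split <;> simp [List.length_modify]

theorem foldA_getD (E : List (Int × Int)) :
    ∀ (ch0 : List (List Int)) (q : Nat), q < ch0.length →
      (E.foldl (fun ch jp => if 0 ≤ jp.2 then ch.modify jp.2.toNat (fun c => c ++ [jp.1]) else ch) ch0).getD q []
        = ch0.getD q [] ++
          (E.filter (fun jp => decide (0 ≤ jp.2) && (jp.2.toNat == q))).map (fun jp => jp.1) := by
  induction E with
  | nil => intro ch0 q hq; simp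
  | cons jp E ih =>
    intro ch0 q hq
    simp only [List.foldl_cons]
    by_cases hp : 0 ≤ jp.2
    · by_cases hpq : jp.2.toNat = q
      · rw [if_pos hp, ih _ q (by rw [List.length_modify]; exact hq)]
        have hmod : (ch0.modify jp.2.toNat (fun c => c ++ [jp.1])).getD q []
            = ch0.getD q [] ++ [jp.1] := by
          rw [List.getD_eq_getElem _ _ (by rw [List.length_modify]; exact hq),
              List.getElem_modify, if_pos hpq, List.getD_eq_getElem _ _ hq]
        rw [hmod]
        rw [List.filter_cons_of_pos (by simp [hp, hpq])]
        simp
      · rw [if_pos hp, ih _ q (by rw [List.length_modify]; exact hq)]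
        have hmod : (ch0.modify jp.2.toNat (fun c => c ++ [jp.1])).getD q []
            = ch0.getD q [] := by
          rw [List.getD_eq_getElem _ _ (by rw [List.length_modify]; exact hq),
              List.getElem_modify, if_neg hpq, List.getD_eq_getElem _ _ hq]
        rw [hmod]
        rw [List.filter_cons_of_neg (by simp [hpq])]
    · rw [if_neg hp, ih _ q hq]
      rw [List.filter_cons_of_neg (by simp [hp])]

theorem length_build_children (parents : List Int) :
    (build_children parents).length = parents.length := by
  unfold build_children
  simp [foldA_length]

theorem getD_build_children {parents : List Int} {q : Nat} (hq : q < parents.length) :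
    (build_children parents).getD q []
      = PySem.List.sorted
          (((PySem.List.enumerate parents).filter
              (fun jp => decide (0 ≤ jp.2) && (jp.2.toNat == q))).map (fun jp => jp.1))
          (fun x => x) false := by
  unfold build_children
  simp only []
  have hlen0 : ((List.range parents.length).map (fun _ => ([] : List Int))).length = parents.length := by simp
  have hlenF : ((PySem.List.enumerate parents).foldl
      (fun ch jp => if 0 ≤ jp.2 then ch.modify jp.2.toNat (fun c => c ++ [jp.1]) else ch)
      ((List.range parents.length).map (fun _ => ([] : List Int)))).length = parents.length := by
    rw [foldA_length]; exact hlen0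
  rw [List.getD_eq_getElem _ _ (by rw [List.length_map]; omega), List.getElem_map]
  rw [← List.getD_eq_getElem _ ([] : List Int) (by omega)]
  rw [foldA_getD _ _ q (by omega)]
  have h0 : ((List.range parents.length).map (fun _ => ([] : List Int))).getD q [] = [] := by
    rw [List.getD_eq_getElem _ _ (by omega), List.getElem_map]
  rw [h0, List.nil_append]

theorem mem_children {parents : List Int} {q : Nat} (hq : q < parents.length) {x : Int} :
    x ∈ (build_children parents).getD q [] ↔
      ∃ (k : Nat), ∃ (hk : k < parents.length),
        x = Int.ofNat k ∧ 0 ≤ parents[k] ∧ parents[k].toNat = q := by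
  rw [getD_build_children hq, PySem.List.mem_sorted]
  simp only [List.mem_map, List.mem_filter]
  constructor
  · rintro ⟨jp, ⟨hmem, hcond⟩, rfl⟩
    rcases (PySem.List.mem_enumerate_iff _ _ _).mp hmem with ⟨k, hk, rfl⟩
    simp at hcond
    exact ⟨k, hk, by simp, hcond.1, hcond.2⟩
  · rintro ⟨k, hk, rfl, h1, h2⟩
    refine ⟨(Int.ofNat k, parents[k]), ⟨?_, by simp [h1, h2]⟩, rfl⟩
    exact (PySem.List.mem_enumerate_iff _ _ _).mpr ⟨k, hk, by simp⟩

theorem nodup_children {parents : List Int} (q : Nat) :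
    ((build_children parents).getD q []).Nodup := by
  by_cases hq : q < parents.length
  · rw [getD_build_children hq]
    have hperm := PySem.List.sorted_perm
      (((PySem.List.enumerate parents).filter
          (fun jp => decide (0 ≤ jp.2) && (jp.2.toNat == q))).map (fun jp => jp.1))
      (fun x : Int => x) false
    rw [hperm.nodup_iff]
    have hpw : (((PySem.List.enumerate parents).filter
        (fun jp => decide (0 ≤ jp.2) && (jp.2.toNat == q)))).Pairwise (fun a b => a.1 < b.1) :=
      (PySem.List.pairwise_lt_enumerate parents 0).filter _
    rw [List.nodup_iff_pairwise_ne]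
    rw [List.pairwise_map]
    exact hpw.imp (fun h => ne_of_lt h)
  · rw [List.getD_eq_default]
    · exact List.nodup_nil
    · rw [length_build_children]; omega

-- joints appearing in children lists are never 0 and are themselves reachable
theorem mem_children_facts {parents : List Int} {j x : Int} {c : List Int}
    (hpre : Pre_build_supports parents) (hc : Chain parents j c) (h0j : 0 ≤ j)
    (hjn : j.toNat < parents.length)
    (hx : x ∈ (build_children parents).getD j.toNat []) :
    0 ≤ x ∧ x ≠ 0 ∧ parents.getD x.toNat (-1) = j ∧ x.toNat < parents.length ∧
      Chain parents x (c ++ [x]) := by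
  rcases (mem_children hjn).mp hx with ⟨k, hk, rfl, h1, h2⟩
  have h0x : (0 : Int) ≤ Int.ofNat k := Int.natCast_nonneg k
  have hkt : (Int.ofNat k).toNat = k := rfl
  have hgd : parents.getD (Int.ofNat k).toNat (-1) = j := by
    rw [hkt, List.getD_eq_getElem _ _ hk]; omega
  have hx0 : (Int.ofNat k) ≠ 0 := by
    intro h
    rw [h] at hgd
    exact pre_no_zero_parent hpre hc (by simpa using hgd)
  refine ⟨h0x, hx0, hgd, by omega, ?_⟩
  exact Chain.step _ _ hx0 h0x (by rw [hgd]; exact h0j) (by rw [hgd]; exact hc)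

theorem mem_children_of {parents : List Int} {j x : Int} (hq : j.toNat < parents.length)
    (h0x : 0 ≤ x) (hxn : x.toNat < parents.length) (h0j : 0 ≤ j)
    (hp : parents.getD x.toNat (-1) = j) :
    x ∈ (build_children parents).getD j.toNat [] := by
  refine (mem_children hq).mpr ⟨x.toNat, hxn, by simp [Int.toNat_of_nonneg h0x], ?_, ?_⟩
  · rw [← List.getD_eq_getElem _ (-1) hxn, hp]; exact h0j
  · rw [← List.getD_eq_getElem _ (-1) hxn, hp]

theorem ofNat_toNat_eq {x : Int} (h : 0 ≤ x) : Int.ofNat x.toNat = x := by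
  rw [Int.ofNat_eq_natCast, Int.toNat_of_nonneg h]

theorem chain_self_mem {parents : List Int} {j : Int} {c : List Int}
    (h : Chain parents j c) : j ∈ c := by
  obtain ⟨c', hc'⟩ := List.getLast?_eq_some_iff.mp (chain_getLast? h)
  rw [hc']; simp

theorem dfs_order_length_le {parents : List Int} {order : List Int}
    (hpre : Pre_build_supports parents) (hnd : order.Nodup)
    (hch : ∀ j ∈ order, ∃ c, Chain parents j c) : order.length ≤ parents.length := by
  apply nodup_bounded_length_le hnd
  intro x hx
  obtain ⟨c, hc⟩ := hch x hx
  exact ⟨chain_nonneg hc, chain_elem_lt hpre.1 hc x (chain_self_mem hc)⟩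

-- ---- the DFS loop invariant ----

def DfsInv (parents : List Int) (order stack : List Int) : Prop :=
  order.head? = some 0 ∧
  (∀ k, k < order.length → order.getD k 0 = 0 → k = 0) ∧
  order.Nodup ∧ stack.Nodup ∧ (∀ x ∈ order, x ∉ stack) ∧
  (∀ j ∈ order, ∃ c, Chain parents j c) ∧
  (∀ s ∈ stack, ∃ c, Chain parents s c) ∧
  (∀ s ∈ stack, s ≠ 0 ∧ parents.getD s.toNat (-1) ∈ order) ∧
  (∀ k, k < order.length → order.getD k 0 ≠ 0 →
    parents.getD (order.getD k 0).toNat (-1) ∈ order.take k) ∧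
  (∀ i c, Chain parents i c → i ∈ order ∨ ∃ a ∈ stack, a ∈ c)

def FinalOrd (parents : List Int) (L : List Int) : Prop :=
  L.head? = some 0 ∧
  (∀ k, k < L.length → L.getD k 0 = 0 → k = 0) ∧
  (∀ j ∈ L, ∃ c, Chain parents j c) ∧
  (∀ k, k < L.length → L.getD k 0 ≠ 0 →
    parents.getD (L.getD k 0).toNat (-1) ∈ L.take k) ∧
  (∀ i c, Chain parents i c → i ∈ L)

theorem inv_step {parents : List Int} {order stack : List Int} {j : Int}
    (hpre : Pre_build_supports parents) (hInv : DfsInv parents order stack)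
    (hj : stack.getLast? = some j) :
    DfsInv parents (order ++ [j])
      (stack.dropLast ++ ((build_children parents).getD j.toNat []).reverse) := by
  obtain ⟨pre, rfl⟩ := List.getLast?_eq_some_iff.mp hj
  rw [List.dropLast_concat]
  obtain ⟨h1, h2, h3, h4, h5, h6, h7, h8, h9, h10⟩ := hInv
  have hjstk : j ∈ pre ++ [j] := by simp
  obtain ⟨cj, hcj⟩ := h7 j hjstk
  obtain ⟨hj0, hjp⟩ := h8 j hjstk
  have hjnotord : j ∉ order := fun h => (h5 j h) hjstk
  have h0j : 0 ≤ j := chain_nonneg hcj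
  have hjcj : j ∈ cj := by
    obtain ⟨c', hc'⟩ := List.getLast?_eq_some_iff.mp (chain_getLast? hcj)
    rw [hc']; simp
  have hjn : j.toNat < parents.length := chain_elem_lt hpre.1 hcj j hjcj
  have hpf : ∀ x ∈ (build_children parents).getD j.toNat [],
      0 ≤ x ∧ x ≠ 0 ∧ parents.getD x.toNat (-1) = j ∧ x.toNat < parents.length ∧
        Chain parents x (cj ++ [x]) :=
    fun x hx => mem_children_facts hpre hcj h0j hjn hx
  have hpushnotord : ∀ x ∈ (build_children parents).getD j.toNat [], x ∉ order := by
    intro x hx hxord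
    obtain ⟨_, hx0, hxp, _, _⟩ := hpf _ hx
    rcases List.getElem_of_mem hxord with ⟨k, hk, hke⟩
    have := h9 k hk (by rw [List.getD_eq_getElem _ _ hk, hke]; exact hx0)
    rw [List.getD_eq_getElem _ _ hk, hke, hxp] at this
    exact hjnotord (List.take_subset _ _ this)
  have hpushnotpre : ∀ x ∈ (build_children parents).getD j.toNat [], x ∉ pre := by
    intro x hx hxpre
    obtain ⟨_, _, hxp, _, _⟩ := hpf _ hx
    have := (h8 x (by simp [hxpre])).2
    rw [hxp] at this
    exact hjnotord this
  have hjnotchl : j ∉ (build_children parents).getD j.toNat [] := by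
    intro hx
    obtain ⟨_, _, hxp, _, _⟩ := hpf _ hx
    exact pre_no_self_parent hpre hcj hxp
  have hjnotpre : j ∉ pre := by
    rcases List.nodup_append.mp h4 with ⟨_, _, hd⟩
    intro hx
    exact hd j hx j (by simp) rfl
  have hord_ne : order ≠ [] := by intro h; rw [h] at h1; simp at h1
  refine ⟨?_, ?_, ?_, ?_, ?_, ?_, ?_, ?_, ?_, ?_⟩
  · rcases order with _ | ⟨a, t⟩
    · exact absurd rfl hord_ne
    · simpa using h1
  · intro k hk hke
    by_cases hko : k < order.length
    · exact h2 k hko (by rw [List.getD_append _ _ _ _ hko] at hke; exact hke)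
    · exfalso
      have hkeq : k = order.length := by simp at hk; omega
      rw [List.getD_eq_getElem _ _ (by simp; omega),
          List.getElem_concat_length hkeq (by simp; omega)] at hke
      exact hj0 hke
  · exact List.nodup_append.mpr ⟨h3, by simp, fun a ha b hb => by simp at hb; subst hb; exact fun h => hjnotord (h ▸ ha)⟩
  · refine List.nodup_append.mpr ⟨(List.nodup_append.mp h4).1, List.nodup_reverse.mpr (nodup_children _), ?_⟩
    intro a ha b hb
    rw [List.mem_reverse] at hb
    intro h; subst h
    exact hpushnotpre a hb ha
  · intro x hx
    rw [List.mem_append] at hx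
    rcases hx with hx | hx
    · intro hmem
      rw [List.mem_append] at hmem
      rcases hmem with hmem | hmem
      · exact h5 x hx (by simp [hmem])
      · rw [List.mem_reverse] at hmem
        exact hpushnotord x hmem hx
    · simp at hx; subst hx
      intro hmem
      rw [List.mem_append] at hmem
      rcases hmem with hmem | hmem
      · exact hjnotpre hmem
      · rw [List.mem_reverse] at hmem
        exact hjnotchl hmem
  · intro x hx
    rw [List.mem_append] at hx
    rcases hx with hx | hx
    · exact h6 x hx
    · simp at hx; subst hx; exact ⟨cj, hcj⟩
  · intro s hs
    rw [List.mem_append] at hs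
    rcases hs with hs | hs
    · exact h7 s (by simp [hs])
    · rw [List.mem_reverse] at hs
      exact ⟨cj ++ [s], (hpf _ hs).2.2.2.2⟩
  · intro s hs
    rw [List.mem_append] at hs
    rcases hs with hs | hs
    · obtain ⟨hs0, hsp⟩ := h8 s (by simp [hs])
      exact ⟨hs0, List.mem_append.mpr (Or.inl hsp)⟩
    · rw [List.mem_reverse] at hs
      obtain ⟨_, hs0, hsp, _, _⟩ := hpf _ hs
      exact ⟨hs0, by rw [hsp]; simp⟩
  · intro k hk hke
    by_cases hko : k < order.length
    · rw [List.getD_append _ _ _ _ hko] at hke ⊢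
      rw [List.take_append_of_le_length (by omega)]
      exact h9 k hko hke
    · have hkeq : k = order.length := by simp at hk; omega
      have hgd : (order ++ [j]).getD k 0 = j := by
        rw [List.getD_eq_getElem _ _ (by simp; omega)]
        exact List.getElem_concat_length hkeq (by simp; omega)
      rw [hgd]
      rw [hkeq, List.take_append_of_le_length (by omega)]
      rw [List.take_length]
      exact hjp
  · intro i c hc
    rcases h10 i c hc with hio | ⟨a, ha, hac⟩
    · exact Or.inl (by simp [hio])
    · rw [List.mem_append] at ha
      rcases ha with ha | ha
      · exact Or.inr ⟨a, by simp [ha], hac⟩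
      · simp at ha
        rw [ha] at hac
        by_cases hij : i = j
        · exact Or.inl (by simp [hij])
        · obtain ⟨x, hxc, hxj, h0x, hxp⟩ := chain_succ hc hac (fun h => hij h.symm)
          have hxn : x.toNat < parents.length := getD_nonneg_lt (by rw [hxp]; exact h0j)
          have hxchl := mem_children_of hjn h0x hxn h0j hxp
          exact Or.inr ⟨x, by rw [List.mem_append, List.mem_reverse]; exact Or.inr hxchl, hxc⟩

theorem topoLoop_final {parents : List Int}
    (hpre : Pre_build_supports parents) :
    ∀ (fuel : Nat) (order stack : List Int), DfsInv parents order stack →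
      parents.length + 1 ≤ fuel + order.length →
      FinalOrd parents (topoLoop (build_children parents) fuel order stack) := by
  intro fuel
  induction fuel with
  | zero =>
    intro order stack hInv hfc
    exfalso
    obtain ⟨h1, h2, h3, h4, h5, h6, h7, h8, h9, h10⟩ := hInv
    have := dfs_order_length_le hpre h3 h6
    omega
  | succ fuel ih =>
    intro order stack hInv hfc
    cases hgl : stack.getLast? with
    | none =>
      have hstk : stack = [] := List.getLast?_eq_none_iff.mp hgl
      simp only [topoLoop, hgl]
      obtain ⟨h1, h2, h3, h4, h5, h6, h7, h8, h9, h10⟩ := hInv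
      refine ⟨h1, h2, h6, h9, ?_⟩
      intro i c hc
      rcases h10 i c hc with h | ⟨a, ha, -⟩
      · exact h
      · rw [hstk] at ha; simp at ha
    | some j =>
      simp only [topoLoop, hgl]
      exact ih _ _ (inv_step hpre hInv hgl) (by simp; omega)

theorem topo_sort_final {parents : List Int}
    (hpre : Pre_build_supports parents) : FinalOrd parents (topo_sort parents) := by
  have hn : 0 < parents.length := List.length_pos_iff.mpr hpre.1
  have hstep : topo_sort parents
      = topoLoop (build_children parents) parents.length [0]
          (((build_children parents).getD (0 : Int).toNat []).reverse) := rfl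
  rw [hstep]
  have hpf0 : ∀ x ∈ (build_children parents).getD (0 : Int).toNat [],
      0 ≤ x ∧ x ≠ 0 ∧ parents.getD x.toNat (-1) = 0 ∧ x.toNat < parents.length ∧
        Chain parents x ([0] ++ [x]) :=
    fun x hx => mem_children_facts hpre Chain.base le_rfl (by simpa using hn) hx
  apply topoLoop_final hpre
  · refine ⟨rfl, ?_, ?_, ?_, ?_, ?_, ?_, ?_, ?_, ?_⟩
    · intro k hk _; simp at hk; omega
    · simp
    · exact List.nodup_reverse.mpr (nodup_children _)
    · intro x hx hmem
      simp at hx; subst hx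
      rw [List.mem_reverse] at hmem
      exact (hpf0 _ hmem).2.1 rfl
    · intro x hx; simp at hx; subst hx; exact ⟨[0], Chain.base⟩
    · intro s hs
      rw [List.mem_reverse] at hs
      exact ⟨[0] ++ [s], (hpf0 _ hs).2.2.2.2⟩
    · intro s hs
      rw [List.mem_reverse] at hs
      obtain ⟨_, hs0, hsp, _, _⟩ := hpf0 _ hs
      exact ⟨hs0, by rw [hsp]; simp⟩
    · intro k hk hke
      simp at hk; subst hk
      simp at hke
    · intro i c hc
      by_cases hi0 : i = 0
      · exact Or.inl (by simp [hi0])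
      · have h0c : (0 : Int) ∈ c := by
          rcases List.exists_cons_of_ne_nil (chain_nonempty hc) with ⟨a, t, rfl⟩
          have := chain_head? hc
          simp at this
          simp [this]
        obtain ⟨x, hxc, hxj, h0x, hxp⟩ := chain_succ hc h0c (fun h => hi0 h.symm)
        have hxn : x.toNat < parents.length := getD_nonneg_lt (by rw [hxp])
        have hxchl := mem_children_of (by simpa using hn) h0x hxn le_rfl hxp
        exact Or.inr ⟨x, List.mem_reverse.mpr hxchl, hxc⟩
  · simp

-- ---- B: chain_to computes exactly the chain ----

theorem chainLoop_of_chain {parents : List Int} {j : Int} {c : List Int}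
    (hc : Chain parents j c) :
    ∀ acc : List Int, acc.length + c.length ≤ parents.length + 1 →
      chainLoop parents parents.length j acc = (0, acc ++ (c.drop 1).reverse) := by
  induction hc with
  | base =>
    intro acc hlen
    rw [chainLoop]
    simp
  | step j c hj h0 hp hc ih =>
    intro acc hlen
    have hc1 : 0 < c.length := List.length_pos_iff.mpr (chain_nonempty hc)
    rw [chainLoop]
    rw [dif_pos ⟨hj, by simp at hlen ⊢; omega⟩]
    simp only []
    rw [if_neg (by omega)]
    rw [ih (acc ++ [j]) (by simp at hlen ⊢; omega)]
    rcases List.exists_cons_of_ne_nil (chain_nonempty hc) with ⟨a, t, rfl⟩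
    simp

theorem chain_to_eq {parents : List Int} {j : Int} {c : List Int}
    (hpre : Pre_build_supports parents) (hc : Chain parents j c) :
    chain_to parents parents.length j = c := by
  have hne : parents ≠ [] := hpre.1
  have hlen := chain_length_le hne hc
  unfold chain_to
  rw [chainLoop_of_chain hc [] (by simp; omega)]
  simp only [List.nil_append]
  rw [if_neg (by simp)]
  rcases List.exists_cons_of_ne_nil (chain_nonempty hc) with ⟨a, t, hct⟩
  have hhead := chain_head? hc
  rw [hct] at hhead ⊢
  simp at hhead
  subst hhead
  simp

theorem chainLoop_reach {parents : List Int} :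
    ∀ (j : Int) (acc : List Int), 0 ≤ j →
      (chainLoop parents parents.length j acc).1 = 0 → ∃ c, Chain parents j c := by
  intro j acc
  generalize hm : parents.length + 1 - acc.length = m
  induction m generalizing j acc with
  | zero =>
    intro h0j hres
    rw [chainLoop] at hres
    rw [dif_neg (by intro h; omega)] at hres
    simp at hres
    subst hres
    exact ⟨[0], Chain.base⟩
  | succ m ih =>
    intro h0j hres
    rw [chainLoop] at hres
    by_cases hg : j ≠ 0 ∧ acc.length ≤ parents.length
    · rw [dif_pos hg] at hres
      simp only [] at hres
      by_cases hplt : parents.getD j.toNat (-1) < 0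
      · rw [if_pos hplt] at hres
        simp at hres
        exact absurd hres hg.1
      · rw [if_neg hplt] at hres
        rcases ih (parents.getD j.toNat (-1)) (acc ++ [j]) (by simp; omega) (by omega) hres with ⟨c, hc⟩
        exact ⟨c ++ [j], Chain.step _ _ hg.1 h0j (by omega) hc⟩
    · rw [dif_neg hg] at hres
      simp at hres
      subst hres
      exact ⟨[0], Chain.base⟩

theorem chain_to_eq_nil {parents : List Int} {j : Int} (h0 : 0 ≤ j)
    (hnr : ∀ c, ¬ Chain parents j c) : chain_to parents parents.length j = [] := by
  unfold chain_to
  simp only []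
  by_cases hr : (chainLoop parents parents.length j []).1 ≠ 0
  · rw [if_pos hr]
  · simp only [ne_eq, not_not] at hr
    rcases chainLoop_reach j [] h0 hr with ⟨c, hc⟩
    exact absurd hc (hnr c)

-- ---- A: the fold over the topological order fills in exactly the chains ----

theorem fold_result {parents : List Int}
    (hpre : Pre_build_supports parents) (hL : FinalOrd parents (topo_sort parents)) :
    ∀ (todo done : List Int) (res : List (List Int)),
      topo_sort parents = done ++ todo →
      res.length = parents.length →
      (∀ (i : Nat), i < parents.length →
        res.getD i [] = if (Int.ofNat i) ∈ done then chain_to parents parents.length (Int.ofNat i) else []) →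
      (∀ (i : Nat), i < parents.length →
        (todo.foldl (fun result j =>
          let p := parents.getD j.toNat (-1)
          if p < 0 then result.set j.toNat [j]
          else result.set j.toNat ((result.getD p.toNat []) ++ [j])) res).getD i [] =
          if (Int.ofNat i) ∈ done ++ todo then chain_to parents parents.length (Int.ofNat i) else []) ∧
      (todo.foldl (fun result j =>
          let p := parents.getD j.toNat (-1)
          if p < 0 then result.set j.toNat [j]
          else result.set j.toNat ((result.getD p.toNat []) ++ [j])) res).length = parents.length := by
  intro todo
  induction todo with
  | nil =>
    intro done res hsplit hlen hres
    refine ⟨?_, by simpa using hlen⟩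
    intro i hi
    simpa using hres i hi
  | cons j todo ih =>
    intro done res hsplit hlen hres
    obtain ⟨hL1, hL2, hL3, hL4, hL5⟩ := hL
    have hn : 0 < parents.length := List.length_pos_iff.mpr hpre.1
    have hjmem : j ∈ topo_sort parents := by rw [hsplit]; simp
    obtain ⟨cj, hcj⟩ := hL3 j hjmem
    have h0j : 0 ≤ j := chain_nonneg hcj
    have hjn : j.toNat < parents.length := chain_elem_lt hpre.1 hcj j (chain_self_mem hcj)
    have hkd : done.length < (topo_sort parents).length := by rw [hsplit]; simp
    have hgdj : (topo_sort parents).getD done.length 0 = j := by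
      rw [hsplit, List.getD_append_right _ _ _ _ le_rfl]
      simp
    have hLd : topo_sort parents = (done ++ [j]) ++ todo := by rw [hsplit]; simp
    -- one step of the fold
    simp only [List.foldl_cons]
    have hstep : ∀ (res' : List (List Int)), res'.length = parents.length →
        (∀ (i : Nat), i < parents.length →
          res'.getD i [] = if (Int.ofNat i) ∈ done ++ [j] then chain_to parents parents.length (Int.ofNat i) else []) →
        (∀ (i : Nat), i < parents.length →
          (todo.foldl (fun result j =>
            let p := parents.getD j.toNat (-1)
            if p < 0 then result.set j.toNat [j]
            else result.set j.toNat ((result.getD p.toNat []) ++ [j])) res').getD i [] =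
            if (Int.ofNat i) ∈ done ++ j :: todo then chain_to parents parents.length (Int.ofNat i) else []) ∧
        (todo.foldl (fun result j =>
            let p := parents.getD j.toNat (-1)
            if p < 0 then result.set j.toNat [j]
            else result.set j.toNat ((result.getD p.toNat []) ++ [j])) res').length = parents.length := by
      intro res' hlen' hres'
      have H := ih (done ++ [j]) res' hLd hlen' hres'
      refine ⟨?_, H.2⟩
      intro i hi
      rw [H.1 i hi, List.append_assoc, List.singleton_append]
    by_cases hp : parents.getD j.toNat (-1) < 0
    · -- parent negative: only joint 0 is ever processed with a negative parent
      have hj0 : j = 0 := by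
        by_contra hj0
        obtain ⟨c', -, hp0, -⟩ := chain_inv hcj hj0
        omega
      subst hj0
      have hdone : done = [] := by
        have := hL2 done.length hkd (by rw [hgdj])
        exact List.eq_nil_of_length_eq_zero this
      subst hdone
      simp only [Int.toNat_zero] at hp
      simp only [Int.toNat_zero, if_pos hp]
      apply hstep
      · simpa using hlen
      · intro i hi
        by_cases hi0 : i = 0
        · subst hi0
          rw [List.getD_eq_getElem _ _ (by simp only [List.length_set, hlen]; omega),
              List.getElem_set, if_pos rfl]
          rw [if_pos (by simp), show (Int.ofNat 0) = (0 : Int) from rfl,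
              chain_to_eq hpre Chain.base]
        · rw [List.getD_eq_getElem _ _ (by simp only [List.length_set, hlen]; omega),
              List.getElem_set, if_neg (fun h => hi0 h.symm)]
          rw [← List.getD_eq_getElem _ ([] : List Int) (by omega), hres i hi]
          simp only [List.not_mem_nil, if_false]
          rw [if_neg (by simp [Int.ofNat_eq_natCast]; omega)]
    · -- parent nonnegative
      simp only [if_neg hp]
      by_cases hj0 : j = 0
      · subst hj0
        have hdone : done = [] := by
          have := hL2 done.length hkd (by rw [hgdj])
          exact List.eq_nil_of_length_eq_zero this
        subst hdone
        have hresnil : ∀ (i : Nat), i < parents.length → res.getD i [] = [] := by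
          intro i hi
          rw [hres i hi, if_neg (by simp)]
        have hrgp : res.getD (parents.getD (0 : Int).toNat (-1)).toNat [] = [] := by
          by_cases hpr : (parents.getD (0 : Int).toNat (-1)).toNat < parents.length
          · exact hresnil _ hpr
          · rw [List.getD_eq_default]; omega
        simp only [Int.toNat_zero] at hrgp ⊢
        apply hstep
        · simp [hlen]
        · intro i hi
          by_cases hi0 : i = 0
          · subst hi0
            rw [List.getD_eq_getElem _ _ (by simp only [List.length_set, hlen]; omega),
                List.getElem_set, if_pos rfl]
            rw [hrgp, if_pos (by simp), show (Int.ofNat 0) = (0 : Int) from rfl,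
                chain_to_eq hpre Chain.base]
            simp
          · rw [List.getD_eq_getElem _ _ (by simp only [List.length_set, hlen]; omega),
                List.getElem_set, if_neg (fun h => hi0 h.symm)]
            rw [← List.getD_eq_getElem _ ([] : List Int) (by omega), hresnil i hi]
            rw [if_neg (by simp [Int.ofNat_eq_natCast]; omega)]
      · -- the generic case: j ≠ 0, its parent already done
        obtain ⟨c', hceq, hp0, hc'⟩ := chain_inv hcj hj0
        have hpdone : parents.getD j.toNat (-1) ∈ done := by
          have h4 := hL4 done.length hkd (by rw [hgdj]; exact hj0)
          rw [hgdj, hsplit, List.take_append_of_le_length le_rfl, List.take_length] at h4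
          exact h4
        have hpn : (parents.getD j.toNat (-1)).toNat < parents.length :=
          chain_elem_lt hpre.1 hc' _ (chain_self_mem hc')
        have hresp : res.getD (parents.getD j.toNat (-1)).toNat [] = c' := by
          rw [hres _ hpn]
          rw [if_pos (by rwa [ofNat_toNat_eq hp0])]
          rw [ofNat_toNat_eq hp0]
          exact chain_to_eq hpre hc'
        apply hstep
        · simp [hlen]
        · intro i hi
          by_cases hij : i = j.toNat
          · subst hij
            rw [List.getD_eq_getElem _ _ (by simp only [List.length_set, hlen]; omega),
                List.getElem_set, if_pos rfl]
            rw [hresp]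
            rw [if_pos (by simp [Int.ofNat_eq_natCast, Int.toNat_of_nonneg h0j])]
            rw [ofNat_toNat_eq h0j]
            rw [chain_to_eq hpre hcj, hceq]
          · rw [List.getD_eq_getElem _ _ (by simp only [List.length_set, hlen]; omega),
                List.getElem_set, if_neg (fun h => hij h.symm)]
            rw [← List.getD_eq_getElem _ ([] : List Int) (by omega), hres i hi]
            have hmem : (Int.ofNat i ∈ done ++ [j]) ↔ (Int.ofNat i ∈ done) := by
              simp only [List.mem_append, List.mem_singleton]
              constructor
              · rintro (h | h)
                · exact h
                · exfalso; apply hij; rw [Int.ofNat_eq_natCast] at h; omega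
              · exact Or.inl
            rw [if_congr hmem rfl rfl]

-- ===== VERDICT (by name: the statement is the Claim_ definition above) =====
theorem build_supports_spec : Claim_equal_build_supports := by
  intro parents _hdom hpre
  unfold Spec_build_supports
  have hL := topo_sort_final hpre
  have H := fold_result hpre hL (topo_sort parents) []
    ((List.range parents.length).map (fun _ => ([] : List Int)))
    (by simp) (by simp)
    (by
      intro i hi
      rw [List.getD_eq_getElem _ _ (by simp; omega)]
      simp)
  have hBS : build_supports parents = (topo_sort parents).foldl (fun result j =>
      let p := parents.getD j.toNat (-1)
      if p < 0 then result.set j.toNat [j]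
      else result.set j.toNat ((result.getD p.toNat []) ++ [j]))
      ((List.range parents.length).map (fun _ => ([] : List Int))) := rfl
  have hALT : build_supports_alt parents
      = (List.range parents.length).map (fun j => chain_to parents parents.length (Int.ofNat j)) := rfl
  rw [hBS, hALT]
  apply List.ext_getElem
  · rw [H.2]; simp
  · intro i h1 h2
    have hi : i < parents.length := by simpa using h2
    have hv := H.1 i hi
    rw [List.nil_append] at hv
    rw [List.getD_eq_getElem _ _ (by rw [H.2]; exact hi)] at hv
    rw [hv, List.getElem_map]
    have hrange : (List.range parents.length)[i]'(by simpa using hi) = i := List.getElem_range _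
    rw [hrange]
    by_cases hmem : Int.ofNat i ∈ topo_sort parents
    · rw [if_pos hmem]
    · rw [if_neg hmem]
      have h0i : (0 : Int) ≤ Int.ofNat i := by rw [Int.ofNat_eq_natCast]; exact Int.natCast_nonneg i
      rw [chain_to_eq_nil h0i]
      intro c hc
      exact hmem (hL.2.2.2.2 (Int.ofNat i) c hc)
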